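-- pv_equiv track=rewrite | github.com/cyphou/OACToFabric | src/core/intelligence/translation_agent.py | validate_tsql_syntax
-- ===== SOURCE A (Python) =====
-- def validate_tsql_syntax(expression: str) -> tuple[bool, str]:
--     """Basic T-SQL syntax validation."""
--     if not expression or not expression.strip():
--         return False, "Empty expression"
--
--     depth = 0
--     for ch in expression:
--         if ch == "(":
--             depth += 1
--         elif ch == ")":
--             depth -= 1
--         if depth < 0:
--             return False, "Unbalanced parentheses"
--     if depth != 0:
--         return False, "Unbalanced parentheses"
--
--     return True, ""
-- ===== SOURCE B (Python) =====
-- def validate_tsql_syntax(expression: str) -> tuple[bool, str]: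
--     """Basic T-SQL syntax validation (prefix-sum table formulation)."""
--     if not expression or not expression.strip():
--         return False, "Empty expression"
--
--     deltas = [1 if ch == "(" else (-1 if ch == ")" else 0) for ch in expression]
--     prefix = []
--     total = 0
--     for d in deltas:
--         total += d
--         prefix.append(total)
--     if prefix and (min(prefix) < 0 or prefix[-1] != 0):
--         return False, "Unbalanced parentheses"
--     return True, ""
-- ===== Notes on version B (the rewrite author's own statement) =====
-- stated objective: alternative
-- what changed: Instead of a short-circuiting single scan with a running depth counter, B materializes the full running-depth prefix-sum table and then reduces it in separate passes (min and last element) to decide balance.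
import Mathlib
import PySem

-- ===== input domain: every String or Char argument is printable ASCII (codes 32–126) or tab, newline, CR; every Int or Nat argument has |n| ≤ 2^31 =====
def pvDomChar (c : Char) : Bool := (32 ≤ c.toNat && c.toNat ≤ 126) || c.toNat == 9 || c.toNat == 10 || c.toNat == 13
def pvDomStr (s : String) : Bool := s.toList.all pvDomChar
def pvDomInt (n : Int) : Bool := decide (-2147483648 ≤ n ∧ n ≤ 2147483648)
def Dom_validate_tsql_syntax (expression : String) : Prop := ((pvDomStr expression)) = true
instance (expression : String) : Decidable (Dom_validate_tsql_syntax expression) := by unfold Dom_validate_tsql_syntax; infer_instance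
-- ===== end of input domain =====

-- B replaces A's short-circuiting depth scan by materializing the prefix-sum depth table and reducing it (min and last); alternative decomposition, same cost.

-- ===== PORT A =====
-- A's for-loop with early return: recursion over the characters carrying the depth.
def pvLoopA : List Char → Int → Bool × String
  | [], depth => if depth ≠ 0 then (false, "Unbalanced parentheses") else (true, "")
  | c :: cs, depth =>
    let d := if c = '(' then depth + 1 else if c = ')' then depth - 1 else depth
    if d < 0 then (false, "Unbalanced parentheses") else pvLoopA cs d

def validate_tsql_syntax (expression : String) : Bool × String :=
  if expression.toList = [] ∨ (PySem.Str.strip expression).toList = [] then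
    (false, "Empty expression")
  else
    pvLoopA expression.toList 0

-- ===== PORT B =====
def pvDelta (ch : Char) : Int := if ch = '(' then 1 else if ch = ')' then -1 else 0

def validate_tsql_syntax_alt (expression : String) : Bool × String :=
  if expression.toList = [] ∨ (PySem.Str.strip expression).toList = [] then
    (false, "Empty expression")
  else
    let deltas := expression.toList.map pvDelta
    let st := deltas.foldl (fun (p : List Int × Int) d => (p.1 ++ [p.2 + d], p.2 + d)) ([], 0)
    let prefixList := st.1
    if prefixList ≠ [] ∧ ((PySem.List.min? prefixList (fun x => x)).getD 0 < 0 ∨ PySem.List.pyGetD prefixList (-1) 0 ≠ 0) then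
      (false, "Unbalanced parentheses")
    else
      (true, "")

-- ===== PRECONDITION & SPEC =====
def Spec_validate_tsql_syntax (expression : String) (out : Bool × String) : Prop := out = validate_tsql_syntax_alt expression
instance (expression : String) (out : Bool × String) : Decidable (Spec_validate_tsql_syntax expression out) := by unfold Spec_validate_tsql_syntax; infer_instance

-- ===== CLAIM (what is proved, stated in full; the proofs are below) =====
def Claim_equal_validate_tsql_syntax : Prop := ∀ (expression : String), Dom_validate_tsql_syntax expression → Spec_validate_tsql_syntax expression (validate_tsql_syntax expression)

-- ===== LEMMAS AND PROOFS =====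

-- reference prefix-sum list of a delta list starting from s
def pvPref : List Int → Int → List Int
  | [], _ => []
  | d :: ds, s => (s + d) :: pvPref ds (s + d)

theorem pvPref_nil_iff (ds : List Int) (s : Int) : pvPref ds s = [] ↔ ds = [] := by
  cases ds <;> simp [pvPref]

theorem pvPref_getLast? (ds : List Int) (s : Int) (h : ds ≠ []) :
    (pvPref ds s).getLast? = some (s + ds.sum) := by
  induction ds generalizing s with
  | nil => exact absurd rfl h
  | cons d ds ih =>
    cases ds with
    | nil => simp [pvPref]
    | cons e es =>
      have hih := ih (s + d) (by simp)
      simp only [pvPref] at hih ⊢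
      rw [List.getLast?_cons_cons, hih]
      congr 1
      simp only [List.sum_cons]
      ring

theorem pvLoopA_eq (cs : List Char) (s : Int) :
    pvLoopA cs s =
      if (∃ p ∈ pvPref (cs.map pvDelta) s, p < 0) ∨ s + (cs.map pvDelta).sum ≠ 0 then
        (false, "Unbalanced parentheses")
      else (true, "") := by
  induction cs generalizing s with
  | nil => simp [pvLoopA, pvPref]
  | cons c cs ih =>
    have hd : (if c = '(' then s + 1 else if c = ')' then s - 1 else s) = s + pvDelta c := by
      unfold pvDelta; split_ifs <;> ring
    simp only [pvLoopA, hd, List.map_cons, pvPref, List.sum_cons]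
    by_cases hneg : s + pvDelta c < 0
    · rw [if_pos hneg, if_pos (Or.inl ⟨s + pvDelta c, List.mem_cons_self, hneg⟩)]
    · rw [if_neg hneg, ih]
      have hiff : ((∃ p ∈ pvPref (cs.map pvDelta) (s + pvDelta c), p < 0) ∨
            s + pvDelta c + (cs.map pvDelta).sum ≠ 0) ↔
          ((∃ p ∈ (s + pvDelta c) :: pvPref (cs.map pvDelta) (s + pvDelta c), p < 0) ∨
            s + (pvDelta c + (cs.map pvDelta).sum) ≠ 0) := by
        constructor
        · rintro (⟨p, hp, hplt⟩ | hsum)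
          · exact Or.inl ⟨p, List.mem_cons_of_mem _ hp, hplt⟩
          · right; omega
        · rintro (⟨p, hp, hplt⟩ | hsum)
          · rcases List.mem_cons.mp hp with h0 | hp'
            · subst h0; exact absurd hplt hneg
            · exact Or.inl ⟨p, hp', hplt⟩
          · right; omega
      split_ifs with h1 h2 h2
      · rfl
      · exact absurd (hiff.mp h1) h2
      · exact absurd (hiff.mpr h2) h1
      · rfl

theorem pvFoldl_pref (ds : List Int) (acc : List Int) (s : Int) :
    (ds.foldl (fun (p : List Int × Int) d => (p.1 ++ [p.2 + d], p.2 + d)) (acc, s)).1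
      = acc ++ pvPref ds s := by
  induction ds generalizing acc s with
  | nil => simp [pvPref]
  | cons d ds ih => simp [pvPref, List.foldl_cons, ih]

theorem pvMin_neg_iff (L : List Int) (h : L ≠ []) :
    ((PySem.List.min? L (fun x => x)).getD 0 < 0) ↔ ∃ p ∈ L, p < 0 := by
  obtain ⟨m, hm⟩ : ∃ m, PySem.List.min? L (fun x => x) = some m := by
    cases hL : PySem.List.min? L (fun x => x) with
    | none => exact absurd ((PySem.List.min?_eq_none_iff L (fun x => x)).mp hL) h
    | some m => exact ⟨m, rfl⟩
  rw [hm]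
  simp only [Option.getD_some]
  constructor
  · intro hlt; exact ⟨m, PySem.List.min?_mem hm, hlt⟩
  · rintro ⟨p, hp, hplt⟩
    have := PySem.List.min?_isMin hm p hp
    omega

theorem validate_tsql_syntax_eq (expression : String) :
    validate_tsql_syntax expression = validate_tsql_syntax_alt expression := by
  unfold validate_tsql_syntax validate_tsql_syntax_alt
  by_cases hguard : expression.toList = [] ∨ (PySem.Str.strip expression).toList = []
  · rw [if_pos hguard, if_pos hguard]
  · rw [if_neg hguard, if_neg hguard]
    have hne : expression.toList ≠ [] := fun h => hguard (Or.inl h)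
    set ds := expression.toList.map pvDelta with hds
    have hdsne : ds ≠ [] := by simpa [hds] using hne
    have hPne : pvPref ds 0 ≠ [] := (pvPref_nil_iff ds 0).not.mpr hdsne
    simp only [pvFoldl_pref ds [] 0, List.nil_append]
    rw [pvLoopA_eq]
    have hlast : PySem.List.pyGetD (pvPref ds 0) (-1) 0 = 0 + ds.sum := by
      rw [PySem.List.pyGetD_neg_one (pvPref ds 0) 0 hPne]
      have := pvPref_getLast? ds 0 hdsne
      rwa [List.getLast?_eq_some_getLast hPne, Option.some_inj] at this
    have hiff : ((∃ p ∈ pvPref ds 0, p < 0) ∨ (0 : Int) + ds.sum ≠ 0) ↔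
        (pvPref ds 0 ≠ [] ∧
          ((PySem.List.min? (pvPref ds 0) (fun x => x)).getD 0 < 0 ∨
            PySem.List.pyGetD (pvPref ds 0) (-1) 0 ≠ 0)) := by
      rw [hlast]
      constructor
      · rintro (hneg | hsum)
        · exact ⟨hPne, Or.inl ((pvMin_neg_iff _ hPne).mpr hneg)⟩
        · exact ⟨hPne, Or.inr hsum⟩
      · rintro ⟨-, (hmin | hsum)⟩
        · exact Or.inl ((pvMin_neg_iff _ hPne).mp hmin)
        · exact Or.inr hsum
    split_ifs with h1 h2 h2
    · rfl
    · exact absurd (hiff.mp h1) h2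
    · exact absurd (hiff.mpr h2) h1
    · rfl

-- ===== VERDICT (by name: the statement is the Claim_ definition above) =====
theorem validate_tsql_syntax_spec : Claim_equal_validate_tsql_syntax := by
  intro expression _
  exact validate_tsql_syntax_eq expression
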